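-- pv_equiv track=rewrite | github.com/khaaarl/caverns-of-carl | lib/utils.py | bfs
-- ===== SOURCE A (Python) =====
-- def bfs(d, start, max_depth=None):
--     if max_depth is not None and max_depth < 0:
--         return []
--     output = [set([start])]
--     seen = set([start])
--     while True:
--         if max_depth is not None and len(output) > max_depth:
--             break
--         next_layer = set()
--         for item in output[-1]:
--             for neighbor in d[item]:
--                 if neighbor in seen:
--                     continue
--                 next_layer.add(neighbor)
--                 seen.add(neighbor)
--         if not next_layer:
--             break
--         output.append(next_layer)
--     return output
-- ===== SOURCE B (Python) =====
-- def bfs(d, start, max_depth=None):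
--     if max_depth is not None and max_depth < 0:
--         return []
--     order = [(start, 0)]
--     seen = {start}
--     i = 0
--     while i < len(order):
--         node, depth = order[i]
--         i += 1
--         if depth == max_depth:
--             continue
--         for neighbor in d[node]:
--             if neighbor not in seen:
--                 seen.add(neighbor)
--                 order.append((neighbor, depth + 1))
--     output = [set() for _ in range(order[-1][1] + 1)]
--     for node, depth in order:
--         output[depth].add(node)
--     return output
-- ===== Notes on version B (the rewrite author's own statement) =====
-- stated objective: alternative
-- what changed: A grows the result layer by layer, re-expanding output[-1] into a fresh set each round with a separately maintained seen set; B runs one flat FIFO traversal that records every node once with its discovery depth in an `order` list and then buckets that list by depth in a single final pass.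
-- outside the precondition, e.g. on bfs({1: [2]}, 1, 1): A returns [{1}, {2}], B returns [{1}, {2}]; on bfs({1: [], 7: [9]}, 1, None): A returns [{1}], B returns [{1}]
import Mathlib
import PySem

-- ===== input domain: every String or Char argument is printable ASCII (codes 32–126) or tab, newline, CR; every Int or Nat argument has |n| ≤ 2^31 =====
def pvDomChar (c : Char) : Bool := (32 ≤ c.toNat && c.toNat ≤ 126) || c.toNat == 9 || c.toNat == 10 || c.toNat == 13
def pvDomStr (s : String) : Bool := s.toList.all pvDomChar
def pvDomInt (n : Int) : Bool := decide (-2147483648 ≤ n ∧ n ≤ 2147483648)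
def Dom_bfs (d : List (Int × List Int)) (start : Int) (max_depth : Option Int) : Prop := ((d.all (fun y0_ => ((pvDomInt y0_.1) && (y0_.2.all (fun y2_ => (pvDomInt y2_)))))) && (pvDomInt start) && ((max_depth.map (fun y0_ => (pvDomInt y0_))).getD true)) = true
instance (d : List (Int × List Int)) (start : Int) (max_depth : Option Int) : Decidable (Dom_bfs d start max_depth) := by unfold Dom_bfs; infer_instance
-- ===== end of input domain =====

-- B replaces A's layer-by-layer set expansion with one flat FIFO traversal (an `order` list of
-- (node, depth) pairs walked by an index pointer) followed by a bucketing pass by depth.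

-- ===== PORT A =====
-- d[x]: first-match lookup; yields [] where Python raises KeyError (those inputs lie outside Pre_bfs)
def bfsNbrs (d : List (Int × List Int)) (x : Int) : List Int :=
  PySem.Dict.getD (PySem.Dict.mk d) x []

-- `max_depth is not None and len(output) > max_depth`
def bfsGuard (md : Option Int) (n : Int) : Bool :=
  match md with
  | some m => decide (n > m)
  | none => false

-- `max_depth is not None and max_depth < 0`
def bfsNeg (md : Option Int) : Bool :=
  match md with
  | some m => decide (m < 0)
  | none => false

-- body of A's inner `for neighbor in d[item]` loop on the state (next_layer, seen)
def bfsInnerA (st : PySem.Set Int × PySem.Set Int) (nb : Int) : PySem.Set Int × PySem.Set Int :=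
  if PySem.Set.contains st.2 nb then st
  else (PySem.Set.add st.1 nb, PySem.Set.add st.2 nb)

-- A's `for item in output[-1]` double loop, growing (next_layer, seen)
def bfsExpand (d : List (Int × List Int)) (layer : List Int) (st : PySem.Set Int × PySem.Set Int) :
    PySem.Set Int × PySem.Set Int :=
  layer.foldl (fun st item => (bfsNbrs d item).foldl bfsInnerA st) st

-- A's `while True` loop; the fuel only makes it total, it never runs out (proved below)
def bfsLoopA (d : List (Int × List Int)) (md : Option Int) :
    Nat → List (PySem.Set Int) → PySem.Set Int → List (PySem.Set Int)
  | 0, output, _ => output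
  | fuel+1, output, seen =>
    if bfsGuard md (output.length : Int) then output
    else
      let st := bfsExpand d (PySem.List.pyGetD output (-1) []) (PySem.Set.empty, seen)
      if st.1 = [] then output
      else bfsLoopA d md fuel (output ++ [st.1]) st.2

def bfs (d : List (Int × List Int)) (start : Int) (max_depth : Option Int) : List (List Int) :=
  if bfsNeg max_depth then []
  else bfsLoopA d max_depth ((d.flatMap (fun p => p.2)).length + 2)
        [PySem.Set.ofList [start]] (PySem.Set.ofList [start])

-- ===== PORT B =====
-- `depth == max_depth` (False when max_depth is None)
def bfsGuardB (md : Option Int) (depth : Int) : Bool :=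
  match md with
  | some m => decide (depth = m)
  | none => false

-- body of B's `for neighbor in d[node]` loop on the state (pending part of order, seen)
def bfsInnerB (depth : Int) (st : List (Int × Int) × PySem.Set Int) (nb : Int) :
    List (Int × Int) × PySem.Set Int :=
  if PySem.Set.contains st.2 nb then st
  else (st.1 ++ [(nb, depth + 1)], PySem.Set.add st.2 nb)

-- B's `while i < len(order)` loop; `order` is kept split as the processed prefix `done` (= order[:i])
-- and the pending suffix `todo` (= order[i:]); appends to `order` append to `todo`.
-- The fuel only makes it total, it never runs out (proved below).
def bfsLoopB (d : List (Int × List Int)) (md : Option Int) :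
    Nat → List (Int × Int) → List (Int × Int) → PySem.Set Int → List (Int × Int)
  | 0, done, todo, _ => done ++ todo
  | _+1, done, [], _ => done
  | fuel+1, done, (node, depth) :: rest, seen =>
    if bfsGuardB md depth then bfsLoopB d md fuel (done ++ [(node, depth)]) rest seen
    else
      let st := (bfsNbrs d node).foldl (bfsInnerB depth) (rest, seen)
      bfsLoopB d md fuel (done ++ [(node, depth)]) st.1 st.2

-- `output[depth].add(node)`
def bucketUpd (out : List (List Int)) (p : Int × Int) : List (List Int) :=
  PySem.List.pySetD out p.2 (PySem.Set.add (PySem.List.pyGetD out p.2 []) p.1)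

def bfs_alt (d : List (Int × List Int)) (start : Int) (max_depth : Option Int) : List (List Int) :=
  if bfsNeg max_depth then []
  else
    let order := bfsLoopB d max_depth ((d.flatMap (fun p => p.2)).length + 2)
                   [] [(start, 0)] (PySem.Set.ofList [start])
    let output := (PySem.List.pyRange 0 ((PySem.List.pyGetD order (-1) (0, 0)).2 + 1) 1).map
                    (fun _ => (PySem.Set.empty : PySem.Set Int))
    order.foldl bucketUpd output

-- ===== PRECONDITION & SPEC =====
-- Pre_bfs excludes inputs on which Python A raises KeyError (a visited node missing from d); being
-- closed-form it also excludes some inputs where the missing key is never visited (unreachable, or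
-- only reached in the deepest, unexpanded layer) — on those A and B return the same value anyway.
def Pre_bfs (d : List (Int × List Int)) (start : Int) (max_depth : Option Int) : Prop :=
  (max_depth.any (fun m => decide (m ≤ 0)) = true) ∨
  (start ∈ d.map Prod.fst ∧ ∀ p ∈ d, ∀ n ∈ p.2, n ∈ d.map Prod.fst)

instance (d : List (Int × List Int)) (start : Int) (max_depth : Option Int) :
    Decidable (Pre_bfs d start max_depth) := by unfold Pre_bfs; infer_instance

def pvWitness_bfs : (List (Int × List Int)) × Int × Option Int :=
  ([(1, [2, 3]), (2, [1, 4]), (3, []), (4, [2])], 1, none)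

def Spec_bfs (d : List (Int × List Int)) (start : Int) (max_depth : Option Int)
    (out : List (List Int)) : Prop := out = bfs_alt d start max_depth

instance (d : List (Int × List Int)) (start : Int) (max_depth : Option Int) (out : List (List Int)) :
    Decidable (Spec_bfs d start max_depth out) := by unfold Spec_bfs; infer_instance

-- ===== CLAIM (what is proved, stated in full; the proofs are below) =====
def Claim_equal_bfs : Prop := ∀ (d : List (Int × List Int)) (start : Int) (max_depth : Option Int), Dom_bfs d start max_depth → Pre_bfs d start max_depth → Spec_bfs d start max_depth (bfs d start max_depth)

-- ===== LEMMAS AND PROOFS =====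

-- reference trace: the list of BFS layers from layer L onwards (r = remaining depth budget)
def bfsGuardL (r : Option Int) : Bool :=
  match r with
  | some m => decide (m ≤ 0)
  | none => false

def bfsLayers (d : List (Int × List Int)) : Nat → Option Int → List Int → List Int → List (List Int)
  | 0, _, _, L => [L]
  | fuel+1, r, seen, L =>
    if bfsGuardL r then [L]
    else if (bfsExpand d L (PySem.Set.empty, seen)).1 = [] then [L]
    else L :: bfsLayers d fuel (r.map (fun m => m - 1))
           (bfsExpand d L (PySem.Set.empty, seen)).2 (bfsExpand d L (PySem.Set.empty, seen)).1

-- layers flattened with their depths, starting at depth k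
def bfsTag (k : Int) : List (List Int) → List (Int × Int)
  | [] => []
  | L :: Ls => L.map (fun x => (x, k)) ++ bfsTag (k + 1) Ls

theorem bfs_nodup_length_le {α : Type} [DecidableEq α] (l l' : List α)
    (h : l.Nodup) (hs : l ⊆ l') : l.length ≤ l'.length := by
  calc l.length = l.toFinset.card := (List.toFinset_card_of_nodup h).symm
    _ ≤ l'.toFinset.card := Finset.card_le_card (by intro a ha; simp only [List.mem_toFinset] at *; exact hs ha)
    _ ≤ l'.length := l'.toFinset_card_le

theorem bfs_pyGetD_last {α : Type} (ys : List α) (y dflt : α) :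
    PySem.List.pyGetD (ys ++ [y]) (-1) dflt = y := by
  unfold PySem.List.pyGetD PySem.List.pyGet? PySem.List.pyIdx?
  rw [if_neg (by omega), if_pos (by simp)]
  simp

theorem bfs_contains_iff (s : List Int) (x : Int) : PySem.Set.contains s x = true ↔ x ∈ s := by
  simp [PySem.Set.contains]

theorem bfs_add_of_not_mem (s : List Int) (x : Int) (h : x ∉ s) :
    PySem.Set.add s x = s ++ [x] := by
  unfold PySem.Set.add
  rw [if_neg]
  simp [h]

theorem bfs_loopB_nil (d : List (Int × List Int)) (md : Option Int) (f : Nat)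
    (done : List (Int × Int)) (seen : PySem.Set Int) :
    bfsLoopB d md f done [] seen = done := by
  cases f <;> simp [bfsLoopB]

theorem bfs_step_sim (k : Int) (ns : List Int) :
    ∀ (N seen : List Int) (q : List (Int × Int)), N ⊆ seen →
    ∃ Δ : List Int,
      ns.foldl bfsInnerA (N, seen) = (N ++ Δ, seen ++ Δ) ∧
      Δ.Nodup ∧ (∀ x ∈ Δ, x ∉ seen) ∧ Δ ⊆ ns ∧
      ns.foldl (bfsInnerB k) (q, seen) = (q ++ Δ.map (fun x => (x, k + 1)), seen ++ Δ) := by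
  induction ns with
  | nil =>
    intro N seen q _
    exact ⟨[], by simp, by simp, by simp, by simp, by simp⟩
  | cons nb ns ih =>
    intro N seen q hNs
    by_cases hmem : nb ∈ seen
    · have hc : PySem.Set.contains seen nb = true := (bfs_contains_iff _ _).mpr hmem
      obtain ⟨Δ, h1, h2, h3, h4, h5⟩ := ih N seen q hNs
      exact ⟨Δ, by simpa [bfsInnerA, hc, hmem] using h1, h2, h3,
        fun x hx => List.mem_cons_of_mem _ (h4 hx),
        by simpa [bfsInnerB, hc, hmem] using h5⟩
    · have hc : ¬ (PySem.Set.contains seen nb = true) := fun h => hmem ((bfs_contains_iff _ _).mp h)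
      have hnbN : nb ∉ N := fun h => hmem (hNs h)
      have haddN : PySem.Set.add N nb = N ++ [nb] := bfs_add_of_not_mem _ _ hnbN
      have haddS : PySem.Set.add seen nb = seen ++ [nb] := bfs_add_of_not_mem _ _ hmem
      have hsub : N ++ [nb] ⊆ seen ++ [nb] := by
        intro x hx
        rcases List.mem_append.mp hx with h | h
        · exact List.mem_append.mpr (Or.inl (hNs h))
        · exact List.mem_append.mpr (Or.inr h)
      obtain ⟨Δ', h1, h2, h3, h4, h5⟩ := ih (N ++ [nb]) (seen ++ [nb]) (q ++ [(nb, k + 1)]) hsub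
      refine ⟨nb :: Δ', ?_, ?_, ?_, ?_, ?_⟩
      · rw [show N ++ (nb :: Δ') = (N ++ [nb]) ++ Δ' by simp,
            show seen ++ (nb :: Δ') = (seen ++ [nb]) ++ Δ' by simp]
        simpa [bfsInnerA, hc, hmem, haddN, haddS] using h1
      · exact List.nodup_cons.mpr ⟨fun hin => (h3 nb hin) (by simp), h2⟩
      · intro x hx
        rcases List.mem_cons.mp hx with rfl | hx'
        · exact hmem
        · exact fun hs' => h3 x hx' (List.mem_append.mpr (Or.inl hs'))
      · intro x hx
        rcases List.mem_cons.mp hx with rfl | hx'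
        · exact List.mem_cons_self ..
        · exact List.mem_cons_of_mem _ (h4 hx')
      · rw [show seen ++ (nb :: Δ') = (seen ++ [nb]) ++ Δ' by simp,
            show q ++ ((nb :: Δ').map (fun x => (x, k + 1))) = (q ++ [(nb, k + 1)]) ++ Δ'.map (fun x => (x, k + 1)) by simp]
        simpa [bfsInnerB, hc, hmem, haddS] using h5

theorem bfs_layer_sim (d : List (Int × List Int)) (md : Option Int) (k : Int)
    (hskip : bfsGuardB md k = false) (L : List Int) :
    ∀ (N seen : List Int) (done : List (Int × Int)) (f : Nat), N ⊆ seen →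
    ∃ Δ : List Int,
      bfsExpand d L (N, seen) = (N ++ Δ, seen ++ Δ) ∧
      Δ.Nodup ∧ (∀ x ∈ Δ, x ∉ seen) ∧ (∀ x ∈ Δ, ∃ y, x ∈ bfsNbrs d y) ∧
      bfsLoopB d md (L.length + f) done
          (L.map (fun x => (x, k)) ++ N.map (fun x => (x, k + 1))) seen
        = bfsLoopB d md f (done ++ L.map (fun x => (x, k)))
            ((N ++ Δ).map (fun x => (x, k + 1))) (seen ++ Δ) := by
  induction L with
  | nil =>
    intro N seen done f hNs
    exact ⟨[], by simp [bfsExpand], by simp, by simp, by simp, by simp⟩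
  | cons x L ih =>
    intro N seen done f hNs
    obtain ⟨Δx, hx1, hx2, hx3, hx4, hx5⟩ :=
      bfs_step_sim k (bfsNbrs d x) N seen
        (L.map (fun z => (z, k)) ++ N.map (fun z => (z, k + 1))) hNs
    have hsub2 : (N ++ Δx) ⊆ (seen ++ Δx) := by
      intro z hz
      rcases List.mem_append.mp hz with h | h
      · exact List.mem_append.mpr (Or.inl (hNs h))
      · exact List.mem_append.mpr (Or.inr h)
    obtain ⟨Δ', h1, h2, h3, h4, h5⟩ := ih (N ++ Δx) (seen ++ Δx) (done ++ [(x, k)]) f hsub2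
    refine ⟨Δx ++ Δ', ?_, ?_, ?_, ?_, ?_⟩
    · rw [show N ++ (Δx ++ Δ') = (N ++ Δx) ++ Δ' by simp,
          show seen ++ (Δx ++ Δ') = (seen ++ Δx) ++ Δ' by simp]
      rw [show bfsExpand d (x :: L) (N, seen)
            = bfsExpand d L ((bfsNbrs d x).foldl bfsInnerA (N, seen)) from rfl, hx1]
      exact h1
    · exact List.Nodup.append hx2 h2
        (fun a ha1 ha2 => h3 a ha2 (List.mem_append.mpr (Or.inr ha1)))
    · intro z hz
      rcases List.mem_append.mp hz with h | h
      · exact hx3 z h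
      · exact fun hs' => h3 z h (List.mem_append.mpr (Or.inl hs'))
    · intro z hz
      rcases List.mem_append.mp hz with h | h
      · exact ⟨x, hx4 h⟩
      · exact h4 z h
    · rw [show (x :: L).length + f = (L.length + f) + 1 by simp only [List.length_cons]; omega]
      rw [show ((x :: L).map (fun z => (z, k)) ++ N.map (fun z => (z, k + 1)))
            = (x, k) :: (L.map (fun z => (z, k)) ++ N.map (fun z => (z, k + 1))) by simp]
      rw [show bfsLoopB d md ((L.length + f) + 1) done
            ((x, k) :: (L.map (fun z => (z, k)) ++ N.map (fun z => (z, k + 1)))) seen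
          = if bfsGuardB md k then
              bfsLoopB d md (L.length + f) (done ++ [(x, k)])
                (L.map (fun z => (z, k)) ++ N.map (fun z => (z, k + 1))) seen
            else
              bfsLoopB d md (L.length + f) (done ++ [(x, k)])
                ((bfsNbrs d x).foldl (bfsInnerB k)
                  (L.map (fun z => (z, k)) ++ N.map (fun z => (z, k + 1)), seen)).1
                ((bfsNbrs d x).foldl (bfsInnerB k)
                  (L.map (fun z => (z, k)) ++ N.map (fun z => (z, k + 1)), seen)).2 from rfl]
      rw [if_neg (by simp [hskip]), hx5]
      simp only []
      rw [show (L.map (fun z => (z, k)) ++ N.map (fun z => (z, k + 1)))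
            ++ Δx.map (fun z => (z, k + 1))
          = L.map (fun z => (z, k)) ++ (N ++ Δx).map (fun z => (z, k + 1)) by simp]
      rw [h5]
      simp

theorem bfs_skip_layer (d : List (Int × List Int)) (md : Option Int) (k : Int)
    (hskip : bfsGuardB md k = true) (L : List Int) :
    ∀ (done : List (Int × Int)) (f : Nat) (seen : PySem.Set Int),
    bfsLoopB d md (L.length + f) done (L.map (fun x => (x, k))) seen
      = bfsLoopB d md f (done ++ L.map (fun x => (x, k))) [] seen := by
  induction L with
  | nil => intro done f seen; simp
  | cons x L ih =>
    intro done f seen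
    rw [show (x :: L).length + f = (L.length + f) + 1 by simp only [List.length_cons]; omega]
    rw [show (x :: L).map (fun z => (z, k)) = (x, k) :: L.map (fun z => (z, k)) by simp]
    rw [show bfsLoopB d md ((L.length + f) + 1) done ((x, k) :: L.map (fun z => (z, k))) seen
        = if bfsGuardB md k then
            bfsLoopB d md (L.length + f) (done ++ [(x, k)]) (L.map (fun z => (z, k))) seen
          else
            bfsLoopB d md (L.length + f) (done ++ [(x, k)])
              ((bfsNbrs d x).foldl (bfsInnerB k) (L.map (fun z => (z, k)), seen)).1
              ((bfsNbrs d x).foldl (bfsInnerB k) (L.map (fun z => (z, k)), seen)).2 from rfl]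
    rw [if_pos (by simp [hskip]), ih (done ++ [(x, k)]) f seen]
    simp

theorem bfs_layers_cons (d : List (Int × List Int)) (fuel : Nat) (r : Option Int)
    (seen L : List Int) : ∃ t, bfsLayers d fuel r seen L = L :: t := by
  cases fuel with
  | zero => exact ⟨[], rfl⟩
  | succ fuel =>
    rw [bfsLayers]
    by_cases h : bfsGuardL r = true
    · rw [if_pos h]; exact ⟨[], rfl⟩
    · rw [if_neg h]
      by_cases h2 : (bfsExpand d L (PySem.Set.empty, seen)).1 = []
      · rw [if_pos h2]; exact ⟨[], rfl⟩
      · rw [if_neg h2]; exact ⟨_, rfl⟩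

theorem bfs_loopA_eq_layers (d : List (Int × List Int)) (md : Option Int) (fuel : Nat) :
    ∀ (out : List (List Int)) (L seen : List Int),
    bfsLoopA d md fuel (out ++ [L]) seen
      = out ++ bfsLayers d fuel (md.map (fun m => m - (out.length : Int))) seen L := by
  induction fuel with
  | zero => intro out L seen; rfl
  | succ fuel ih =>
    intro out L seen
    have hg : bfsGuard md ((out ++ [L]).length : Int)
        = bfsGuardL (md.map (fun m => m - (out.length : Int))) := by
      cases md with
      | none => rfl
      | some m =>
        simp only [bfsGuard, bfsGuardL, Option.map, List.length_append, List.length_cons,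
          List.length_nil]
        rw [decide_eq_decide]
        push_cast
        omega
    rw [show bfsLoopA d md (fuel + 1) (out ++ [L]) seen
        = if bfsGuard md ((out ++ [L]).length : Int) then out ++ [L]
          else if (bfsExpand d (PySem.List.pyGetD (out ++ [L]) (-1) []) (PySem.Set.empty, seen)).1 = []
            then out ++ [L]
          else bfsLoopA d md fuel
            ((out ++ [L]) ++ [(bfsExpand d (PySem.List.pyGetD (out ++ [L]) (-1) []) (PySem.Set.empty, seen)).1])
            (bfsExpand d (PySem.List.pyGetD (out ++ [L]) (-1) []) (PySem.Set.empty, seen)).2 from rfl]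
    rw [bfs_pyGetD_last, hg, bfsLayers]
    by_cases hc : bfsGuardL (md.map (fun m => m - (out.length : Int))) = true
    · rw [if_pos hc, if_pos hc]
    · rw [if_neg hc, if_neg hc]
      by_cases h2 : (bfsExpand d L (PySem.Set.empty, seen)).1 = []
      · rw [if_pos h2, if_pos h2]
      · rw [if_neg h2, if_neg h2, ih (out ++ [L]) _ _]
        have hmap : md.map (fun m => m - ((out ++ [L]).length : Int))
            = (md.map (fun m => m - (out.length : Int))).map (fun m => m - 1) := by
          cases md with
          | none => rfl
          | some m =>
            show some (m - ((out ++ [L]).length : Int)) = some (m - (out.length : Int) - 1)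
            rw [sub_sub]
            congr 1
            simp only [List.length_append, List.length_cons, List.length_nil]
            push_cast
            ring
        rw [hmap]
        simp

theorem bfs_loop_sim (d : List (Int × List Int)) (md : Option Int) (univ : List Int)
    (hU : ∀ y x, x ∈ bfsNbrs d y → x ∈ univ) (fuelA : Nat) :
    ∀ (k : Int) (L seen : List Int) (done : List (Int × Int)) (f : Nat),
    L ⊆ seen → seen.Nodup → seen ⊆ univ →
    (∀ m, md = some m → k ≤ m) →
    univ.length + 1 ≤ seen.length + fuelA →
    bfsLoopB d md ((bfsLayers d fuelA (md.map (fun m => m - k)) seen L).flatten.length + f)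
        done (L.map (fun x => (x, k))) seen
      = done ++ bfsTag k (bfsLayers d fuelA (md.map (fun m => m - k)) seen L) := by
  induction fuelA with
  | zero =>
    intro k L seen done f hLs hnd hsU hk hfuel
    have := bfs_nodup_length_le seen univ hnd hsU
    omega
  | succ fuelA ih =>
    intro k L seen done f hLs hnd hsU hk hfuel
    by_cases hc : bfsGuardL (md.map (fun m => m - k)) = true
    · cases md with
      | none => simp [bfsGuardL, Option.map] at hc
      | some m =>
        have hm : m - k ≤ 0 := by simpa [bfsGuardL, Option.map] using hc
        have hkm : k ≤ m := hk m rfl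
        have hskip : bfsGuardB (some m) k = true := by
          simp only [bfsGuardB]
          rw [decide_eq_true_eq]
          omega
        rw [bfsLayers, if_pos hc]
        rw [show ([L] : List (List Int)).flatten.length = L.length by simp]
        rw [bfs_skip_layer d (some m) k hskip L done f seen, bfs_loopB_nil]
        simp [bfsTag]
    · have hskip : bfsGuardB md k = false := by
        cases md with
        | none => rfl
        | some m =>
          have hm : ¬ (m - k ≤ 0) := by simpa [bfsGuardL, Option.map] using hc
          simp only [bfsGuardB]
          rw [decide_eq_false_iff_not]
          omega
      by_cases hst : (bfsExpand d L (PySem.Set.empty, seen)).1 = []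
      · rw [bfsLayers, if_neg hc, if_pos hst]
        obtain ⟨Δ, hexp, _, _, _, hloop⟩ :=
          bfs_layer_sim d md k hskip L [] seen done f (by simp)
        have hexp' : bfsExpand d L (PySem.Set.empty, seen) = (Δ, seen ++ Δ) := by
          simpa using hexp
        have hΔ : Δ = [] := by rw [hexp'] at hst; exact hst
        subst hΔ
        simp only [List.map_nil, List.append_nil] at hloop
        rw [show ([L] : List (List Int)).flatten.length = L.length by simp, hloop, bfs_loopB_nil]
        simp [bfsTag]
      · rw [bfsLayers, if_neg hc, if_neg hst]
        have hmap : (md.map (fun m => m - k)).map (fun m => m - 1)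
            = md.map (fun m => m - (k + 1)) := by
          cases md with
          | none => rfl
          | some m =>
            show some (m - k - 1) = some (m - (k + 1))
            rw [sub_sub]
        rw [hmap]
        obtain ⟨Δ, hexp, hΔnd, hfresh, hnbr, hloop⟩ :=
          bfs_layer_sim d md k hskip L [] seen done
            ((bfsLayers d fuelA (md.map (fun m => m - (k + 1)))
              (bfsExpand d L (PySem.Set.empty, seen)).2
              (bfsExpand d L (PySem.Set.empty, seen)).1).flatten.length + f) (by simp)
        have hexp' : bfsExpand d L (PySem.Set.empty, seen) = (Δ, seen ++ Δ) := by
          simpa using hexp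
        rw [hexp']
        have hΔne : Δ ≠ [] := by rw [hexp'] at hst; simpa using hst
        have hΔlen : 0 < Δ.length := List.length_pos_of_ne_nil hΔne
        have hsnd : (seen ++ Δ).Nodup :=
          List.Nodup.append hnd hΔnd (fun a ha hb => hfresh a hb ha)
        have hsU' : (seen ++ Δ) ⊆ univ := by
          intro x hx
          rcases List.mem_append.mp hx with h | h
          · exact hsU h
          · obtain ⟨y, hy⟩ := hnbr x h
            exact hU y x hy
        have hk' : ∀ m, md = some m → k + 1 ≤ m := by
          intro m hm
          rw [hm] at hc
          have : ¬ (m - k ≤ 0) := by simpa [bfsGuardL, Option.map] using hc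
          omega
        have hfuel' : univ.length + 1 ≤ (seen ++ Δ).length + fuelA := by
          simp only [List.length_append]
          omega
        have hih := ih (k + 1) Δ (seen ++ Δ) (done ++ L.map (fun x => (x, k))) f
          (List.subset_append_right ..) hsnd hsU' hk' hfuel'
        rw [hexp'] at hloop
        simp only [List.nil_append, List.map_nil, List.append_nil] at hloop
        rw [show (L :: bfsLayers d fuelA (md.map (fun m => m - (k + 1))) (seen ++ Δ) Δ).flatten.length
            = L.length + (bfsLayers d fuelA (md.map (fun m => m - (k + 1))) (seen ++ Δ) Δ).flatten.length by
              simp [List.flatten_cons]]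
        rw [Nat.add_assoc, hloop, hih]
        simp [bfsTag]

theorem bfs_layers_props (d : List (Int × List Int)) (univ : List Int)
    (hU : ∀ y x, x ∈ bfsNbrs d y → x ∈ univ) (fuel : Nat) :
    ∀ (r : Option Int) (seen L : List Int), L ⊆ seen → seen.Nodup →
    (seen ++ (bfsLayers d fuel r seen L).tail.flatten).Nodup ∧
    (∀ x ∈ (bfsLayers d fuel r seen L).tail.flatten, x ∈ univ) ∧
    (∀ M ∈ (bfsLayers d fuel r seen L).tail, M ≠ [] ∧ M.Nodup) := by
  induction fuel with
  | zero =>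
    intro r seen L hLs hnd
    refine ⟨by simpa [bfsLayers] using hnd, by simp [bfsLayers], by simp [bfsLayers]⟩
  | succ fuel ih =>
    intro r seen L hLs hnd
    by_cases hc : bfsGuardL r = true
    · rw [bfsLayers, if_pos hc]
      exact ⟨by simpa using hnd, by simp, by simp⟩
    · by_cases hst : (bfsExpand d L (PySem.Set.empty, seen)).1 = []
      · rw [bfsLayers, if_neg hc, if_pos hst]
        exact ⟨by simpa using hnd, by simp, by simp⟩
      · obtain ⟨Δ, hexp, hΔnd, hfresh, hnbr, _⟩ :=
          bfs_layer_sim d none 0 rfl L [] seen [] 0 (by simp)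
        have hexp' : bfsExpand d L (PySem.Set.empty, seen) = (Δ, seen ++ Δ) := by
          simpa using hexp
        rw [bfsLayers, if_neg hc, if_neg hst, hexp']
        have hΔne : Δ ≠ [] := by rw [hexp'] at hst; simpa using hst
        have hsnd : (seen ++ Δ).Nodup :=
          List.Nodup.append hnd hΔnd (fun a ha hb => hfresh a hb ha)
        obtain ⟨ih1, ih2, ih3⟩ := ih (r.map (fun m => m - 1)) (seen ++ Δ) Δ
          (List.subset_append_right ..) hsnd
        obtain ⟨t, ht⟩ := bfs_layers_cons d fuel (r.map (fun m => m - 1)) (seen ++ Δ) Δ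
        rw [ht] at ih1 ih2 ih3 ⊢
        simp only [List.tail_cons] at ih1 ih2 ih3 ⊢
        refine ⟨?_, ?_, ?_⟩
        · rw [show seen ++ (Δ :: t).flatten = (seen ++ Δ) ++ t.flatten by simp]
          exact ih1
        · intro x hx
          rw [List.flatten_cons] at hx
          rcases List.mem_append.mp hx with h | h
          · obtain ⟨y, hy⟩ := hnbr x h
            exact hU y x hy
          · exact ih2 x h
        · intro M hM
          rcases List.mem_cons.mp hM with rfl | hM'
          · exact ⟨hΔne, hΔnd⟩
          · exact ih3 M hM' 

theorem bfs_tag_last (Ls : List (List Int)) :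
    ∀ (k : Int), Ls ≠ [] → (∀ M ∈ Ls, M ≠ []) →
    ∃ ys x, bfsTag k Ls = ys ++ [(x, k + Ls.length - 1)] := by
  induction Ls with
  | nil => intro k h _; exact absurd rfl h
  | cons L Ls ih =>
    intro k _ hne
    by_cases h : Ls = []
    · subst h
      have hL : L ≠ [] := hne L (List.mem_cons_self ..)
      refine ⟨(L.dropLast).map (fun z => (z, k)), L.getLast hL, ?_⟩
      rw [show bfsTag k [L] = L.map (fun z => (z, k)) by simp [bfsTag]]
      conv_lhs => rw [← List.dropLast_append_getLast hL]
      rw [show k + (([L] : List (List Int)).length : Int) - 1 = k by simp]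
      simp
    · obtain ⟨ys, x, hx⟩ := ih (k + 1) h (fun M hM => hne M (List.mem_cons_of_mem _ hM))
      refine ⟨L.map (fun z => (z, k)) ++ ys, x, ?_⟩
      rw [show bfsTag k (L :: Ls) = L.map (fun z => (z, k)) ++ bfsTag (k + 1) Ls from rfl, hx]
      rw [show k + 1 + (Ls.length : Int) - 1 = k + ((L :: Ls).length : Int) - 1 by
        simp only [List.length_cons]; push_cast; ring]
      simp

theorem bfs_pyRange_map_const (n : Nat) (c : List Int) :
    (PySem.List.pyRange 0 (n : Int) 1).map (fun _ => c) = List.replicate n c := by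
  rw [List.map_const']
  rw [PySem.List.length_pyRange_one]
  simp

theorem bfs_getD_mid (pre : List (List Int)) (acc : List Int) (suf : List (List Int)) :
    (pre ++ acc :: suf).getD pre.length [] = acc := by
  induction pre with
  | nil => rfl
  | cons p pre ih => simp only [List.cons_append, List.length_cons, List.getD_cons_succ]; exact ih

theorem bfs_set_mid (pre : List (List Int)) (acc v : List Int) (suf : List (List Int)) :
    (pre ++ acc :: suf).set pre.length v = pre ++ v :: suf := by
  induction pre with
  | nil => rfl
  | cons p pre ih => simp only [List.cons_append, List.length_cons, List.set_cons_succ]; rw [ih]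

theorem bfs_bucket_block (L2 : List Int) :
    ∀ (acc : List Int) (pre suf : List (List Int)),
    (∀ x ∈ L2, x ∉ acc) → L2.Nodup →
    (L2.map (fun x => (x, (pre.length : Int)))).foldl bucketUpd (pre ++ acc :: suf)
      = pre ++ (acc ++ L2) :: suf := by
  induction L2 with
  | nil => intro acc pre suf _ _; simp
  | cons x L2 ih =>
    intro acc pre suf hfresh hnd
    simp only [List.map_cons, List.foldl_cons]
    have hstep : bucketUpd (pre ++ acc :: suf) (x, (pre.length : Int))
        = pre ++ (acc ++ [x]) :: suf := by
      unfold bucketUpd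
      dsimp only
      rw [PySem.List.pyGetD_natCast, bfs_getD_mid,
        bfs_add_of_not_mem _ _ (hfresh x (List.mem_cons_self ..)),
        PySem.List.pySetD_natCast, bfs_set_mid]
    have hfresh' : ∀ z ∈ L2, z ∉ acc ++ [x] := by
      intro z hz hmem
      rcases List.mem_append.mp hmem with h | h
      · exact hfresh z (List.mem_cons_of_mem _ hz) h
      · rcases List.mem_singleton.mp h with rfl
        exact (List.nodup_cons.mp hnd).1 hz
    rw [hstep, ih (acc ++ [x]) pre suf hfresh' (List.nodup_cons.mp hnd).2]
    simp

theorem bfs_bucket_fold (Ls : List (List Int)) :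
    ∀ (pre : List (List Int)), (∀ M ∈ Ls, M.Nodup) →
    (bfsTag (pre.length : Int) Ls).foldl bucketUpd (pre ++ List.replicate Ls.length [])
      = pre ++ Ls := by
  induction Ls with
  | nil => intro pre _; simp [bfsTag]
  | cons L Ls ih =>
    intro pre hnd
    rw [show bfsTag (pre.length : Int) (L :: Ls)
        = L.map (fun z => (z, (pre.length : Int))) ++ bfsTag ((pre.length : Int) + 1) Ls from rfl]
    rw [List.foldl_append]
    rw [show List.replicate (L :: Ls).length ([] : List Int)
        = [] :: List.replicate Ls.length [] from rfl]
    rw [bfs_bucket_block L [] pre (List.replicate Ls.length [])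
      (by simp) (hnd L (List.mem_cons_self ..))]
    rw [show pre ++ (([] : List Int) ++ L) :: List.replicate Ls.length ([] : List Int)
        = (pre ++ [L]) ++ List.replicate Ls.length [] by simp]
    rw [show ((pre.length : Int) + 1) = (((pre ++ [L]).length : Nat) : Int) by simp]
    rw [ih (pre ++ [L]) (fun M hM => hnd M (List.mem_cons_of_mem _ hM))]
    simp

theorem bfs_eq_layers (d : List (Int × List Int)) (start : Int) (md : Option Int)
    (hneg : bfsNeg md = false) :
    bfs d start md
      = bfsLayers d ((d.flatMap (fun p => p.2)).length + 2) md [start] [start] := by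
  unfold bfs
  rw [if_neg (by simp [hneg])]
  have h := bfs_loopA_eq_layers d md ((d.flatMap (fun p => p.2)).length + 2) [] [start] [start]
  simp only [List.nil_append, List.length_nil, Nat.cast_zero, sub_zero, Option.map_id'] at h
  simpa [show PySem.Set.ofList [start] = [start] from rfl] using h

theorem bfs_alt_eq_layers (d : List (Int × List Int)) (start : Int) (md : Option Int)
    (hneg : bfsNeg md = false) :
    bfs_alt d start md
      = bfsLayers d ((d.flatMap (fun p => p.2)).length + 2) md [start] [start] := by
  have hU : ∀ y x, x ∈ bfsNbrs d y → x ∈ (start :: d.flatMap (fun p => p.2)) := by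
    intro y x hx
    unfold bfsNbrs at hx
    rw [PySem.Dict.getD_eq_get?_getD] at hx
    cases hget : PySem.Dict.get? (PySem.Dict.mk d) y with
    | none => rw [hget] at hx; simp at hx
    | some v =>
      rw [hget] at hx
      simp only [Option.getD_some] at hx
      have hmem : (y, v) ∈ (PySem.Dict.mk d).items :=
        PySem.Dict.mem_items_of_get?_eq_some _ hget
      have hmem' : (y, v) ∈ d := hmem
      exact List.mem_cons_of_mem _ (List.mem_flatMap.mpr ⟨(y, v), hmem', hx⟩)
  have hk0 : ∀ m : Int, md = some m → (0 : Int) ≤ m := by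
    intro m hm
    subst hm
    simp only [bfsNeg, decide_eq_false_iff_not] at hneg
    omega
  obtain ⟨t, ht⟩ := bfs_layers_cons d ((d.flatMap (fun p => p.2)).length + 2) md [start] [start]
  obtain ⟨props1, props2, props3⟩ := bfs_layers_props d (start :: d.flatMap (fun p => p.2)) hU
    ((d.flatMap (fun p => p.2)).length + 2) md [start] [start] (by simp) (by simp)
  rw [ht] at props1 props2 props3
  simp only [List.tail_cons] at props1 props2 props3
  have hflat : (bfsLayers d ((d.flatMap (fun p => p.2)).length + 2) md [start] [start]).flatten.length
      ≤ (d.flatMap (fun p => p.2)).length + 1 := by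
    rw [ht]
    have hsub : ([start] ++ t.flatten) ⊆ (start :: d.flatMap (fun p => p.2)) := by
      intro z hz
      rcases List.mem_append.mp hz with h | h
      · rcases List.mem_singleton.mp h with rfl
        exact List.mem_cons_self ..
      · exact props2 z h
    have hlen := bfs_nodup_length_le _ _ props1 hsub
    simp only [List.flatten_cons, List.length_append, List.length_cons, List.length_nil] at hlen ⊢
    omega
  have hsim := bfs_loop_sim d md (start :: d.flatMap (fun p => p.2)) hU
    ((d.flatMap (fun p => p.2)).length + 2) 0 [start] [start] []
    (((d.flatMap (fun p => p.2)).length + 2)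
      - (bfsLayers d ((d.flatMap (fun p => p.2)).length + 2) md [start] [start]).flatten.length)
    (by simp) (by simp) (by simp) hk0
    (by simp only [List.length_cons]; omega)
  simp only [sub_zero, Option.map_id', List.map_cons, List.map_nil, List.nil_append] at hsim
  rw [Nat.add_sub_cancel' (le_trans hflat (by omega))] at hsim
  have hne : ∀ M ∈ bfsLayers d ((d.flatMap (fun p => p.2)).length + 2) md [start] [start], M ≠ [] := by
    rw [ht]
    intro M hM
    rcases List.mem_cons.mp hM with rfl | h
    · simp
    · exact (props3 M h).1
  have hndall : ∀ M ∈ bfsLayers d ((d.flatMap (fun p => p.2)).length + 2) md [start] [start],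
      M.Nodup := by
    rw [ht]
    intro M hM
    rcases List.mem_cons.mp hM with rfl | h
    · simp
    · exact (props3 M h).2
  obtain ⟨ys, x, htag⟩ := bfs_tag_last
    (bfsLayers d ((d.flatMap (fun p => p.2)).length + 2) md [start] [start]) 0
    (by rw [ht]; simp) hne
  have hlast : PySem.List.pyGetD
      (bfsTag 0 (bfsLayers d ((d.flatMap (fun p => p.2)).length + 2) md [start] [start])) (-1) (0, 0)
      = (x, 0 + ((bfsLayers d ((d.flatMap (fun p => p.2)).length + 2) md [start] [start]).length : Int) - 1) := by
    rw [htag]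
    exact bfs_pyGetD_last ..
  have hbf := bfs_bucket_fold
    (bfsLayers d ((d.flatMap (fun p => p.2)).length + 2) md [start] [start]) [] hndall
  simp only [List.length_nil, Nat.cast_zero, List.nil_append] at hbf
  unfold bfs_alt
  rw [if_neg (by simp [hneg])]
  simp only [show PySem.Set.ofList [start] = [start] from rfl,
             show (PySem.Set.empty : PySem.Set Int) = ([] : List Int) from rfl]
  simp only [hsim, hlast]
  rw [show (0 : Int)
        + ((bfsLayers d ((d.flatMap (fun p => p.2)).length + 2) md [start] [start]).length : Int)
        - 1 + 1
      = ((bfsLayers d ((d.flatMap (fun p => p.2)).length + 2) md [start] [start]).length : Int)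
      by ring]
  rw [bfs_pyRange_map_const]
  exact hbf

-- ===== VERDICT (by name: the statement is the Claim_ definition above) =====
theorem bfs_spec : Claim_equal_bfs := by
  unfold Claim_equal_bfs
  intro d start md hdom hpre
  unfold Spec_bfs
  by_cases hneg : bfsNeg md = true
  · unfold bfs bfs_alt
    rw [if_pos hneg, if_pos hneg]
  · rw [bfs_eq_layers d start md (by simpa using hneg),
        bfs_alt_eq_layers d start md (by simpa using hneg)]
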